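-- pv_equiv track=rewrite | github.com/OmegaK2/PyPoE | tests/PyPoE/poe/test_patchserver.py | get_node_folders
-- ===== SOURCE A (Python) =====
-- def get_node_folders(file):
--     dir_paths = []
--     parent_dirs = file.rsplit('/', 1)
--     if len(parent_dirs) < 2:
--         return []
--     cdir = ''
--     for dirname in parent_dirs[0].split('/'):
--         if cdir:
--             cdir += '/'
--         cdir += dirname
--         dir_paths.append(cdir)
--     return dir_paths
-- ===== SOURCE B (Python) =====
-- def get_node_folders(file):
--     parent_dirs = file.rsplit('/', 1)
--     if len(parent_dirs) < 2:
--         return []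
--     parts = parent_dirs[0].split('/')
--     return ['/'.join(parts[:i + 1]) for i in range(len(parts))]
-- ===== Notes on version B (the rewrite author's own statement) =====
-- stated objective: simpler
-- what changed: B replaces the running-accumulator loop (cdir grown in place with a conditional separator) by direct prefix recomputation: it splits the parent once and produces each result by joining a growing prefix slice, eliminating the accumulator.
-- intended difference: On files whose first character is a slash and that contain a second slash later, A drops the leading slash(es) because its separator is only added once the accumulator is nonempty, so at the witness /a/b A returns ['', 'a'] whose second entry is not a parent directory of the input, while B returns ['', '/a'], the true cumulative directory prefixes. — e.g. on get_node_folders("/a/b"): A returns ["", "a"], B returns ["", "/a"]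
import Mathlib
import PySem

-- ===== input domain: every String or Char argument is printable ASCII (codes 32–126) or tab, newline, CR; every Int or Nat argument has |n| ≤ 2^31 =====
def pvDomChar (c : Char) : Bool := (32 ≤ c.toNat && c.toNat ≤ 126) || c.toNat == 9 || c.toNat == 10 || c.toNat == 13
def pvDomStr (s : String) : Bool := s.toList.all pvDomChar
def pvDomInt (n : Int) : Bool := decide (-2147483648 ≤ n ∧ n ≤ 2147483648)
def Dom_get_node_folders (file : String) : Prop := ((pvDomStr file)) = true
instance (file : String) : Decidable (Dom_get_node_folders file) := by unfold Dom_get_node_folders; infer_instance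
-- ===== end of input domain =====

-- The two ports agree except where stated by D_ below: A's conditional-separator accumulator drops
-- leading slashes of absolute paths; B joins each prefix slice directly. Objective: simpler (no
-- accumulator, result built by direct prefix recomputation).

-- ===== PORT A =====
-- hand port of Python's file.rsplit('/', 1) (no PySem primitive): exact — scans from the right,
-- splits at the LAST occurrence of sep, returns [file] when sep does not occur.
def pyRsplit1 (cs : List Char) (sep : Char) : List (List Char) :=
  match cs.reverse.span (fun c => !(c == sep)) with
  | (_, []) => [cs]
  | (tl, _ :: initRev) => [initRev.reverse, tl.reverse]

-- the for-loop of A, carrying its two pieces of state (cdir, dir_paths) verbatim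
def goA (parts : List (List Char)) (cdir : List Char) (dir_paths : List (List Char)) :
    List (List Char) :=
  match parts with
  | [] => dir_paths
  | dirname :: rest =>
    let cdir1 := if cdir ≠ [] then cdir ++ ['/'] else cdir
    let cdir2 := cdir1 ++ dirname
    goA rest cdir2 (dir_paths ++ [cdir2])

def get_node_folders (file : String) : List String :=
  let parent_dirs := pyRsplit1 file.toList '/'
  if parent_dirs.length < 2 then []
  else
    (goA (PySem.Chars.splitOn (parent_dirs.headD []) ['/']) [] []).map String.ofList

-- ===== PORT B =====
def get_node_folders_alt (file : String) : List String :=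
  let parent_dirs := pyRsplit1 file.toList '/'
  if parent_dirs.length < 2 then []
  else
    let parts := PySem.Chars.splitOn (parent_dirs.headD []) ['/']
    (List.range parts.length).map
      (fun i => String.ofList (PySem.Chars.join ['/'] (parts.take (i + 1))))

-- ===== PRECONDITION & SPEC =====
-- On files whose first character is a slash and that contain a second slash later, A drops the
-- leading slash(es) because its separator is only added once the accumulator is nonempty, so at
-- the witness /a/b A returns ['', 'a'] whose second entry is not a parent directory of the input,
-- while B returns ['', '/a'], the true cumulative directory prefixes.
def D_get_node_folders (file : String) : Prop :=
  file.toList.head? = some '/' ∧ '/' ∈ file.toList.drop 1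

instance (file : String) : Decidable (D_get_node_folders file) := by
  unfold D_get_node_folders; infer_instance

def Spec_get_node_folders (file : String) (out : List String) : Prop :=
  ¬ D_get_node_folders file → out = get_node_folders_alt file

instance (file : String) (out : List String) : Decidable (Spec_get_node_folders file out) := by
  unfold Spec_get_node_folders; infer_instance

def pvDiffWitness_get_node_folders : String := "/a/b"

def pvDiffWitnessOut_get_node_folders : (List String) × (List String) :=
  (["", "a"], ["", "/a"])

-- ===== CLAIM (what is proved, stated in full; the proofs are below) =====
def Claim_unchanged_get_node_folders : Prop := ∀ (file : String), Dom_get_node_folders file → Spec_get_node_folders file (get_node_folders file)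

def Claim_changed_get_node_folders : Prop := Dom_get_node_folders (pvDiffWitness_get_node_folders) ∧ D_get_node_folders (pvDiffWitness_get_node_folders) ∧ get_node_folders (pvDiffWitness_get_node_folders) = pvDiffWitnessOut_get_node_folders.1 ∧ get_node_folders_alt (pvDiffWitness_get_node_folders) = pvDiffWitnessOut_get_node_folders.2 ∧ pvDiffWitnessOut_get_node_folders.1 ≠ pvDiffWitnessOut_get_node_folders.2

def Claim_exact_get_node_folders : Prop := ∀ (file : String), Dom_get_node_folders file → D_get_node_folders file → get_node_folders file ≠ get_node_folders_alt file

-- ===== LEMMAS AND PROOFS =====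

-- structural form of splitting on a single-character separator
def split1 (sep : Char) : List Char → List (List Char)
  | [] => [[]]
  | c :: t => if c = sep then [] :: split1 sep t else (split1 sep t).modifyHead (c :: ·)

lemma split1_ne_nil (sep : Char) (cs : List Char) : split1 sep cs ≠ [] := by
  induction cs with
  | nil => simp [split1]
  | cons c t ih =>
    simp only [split1]
    split_ifs
    · simp
    · cases h : split1 sep t with
      | nil => exact absurd h ih
      | cons a l => simp

lemma go_spec (sep : Char) : ∀ (l : List Char) (fuel : Nat), l.length < fuel →
    ∀ (cur : List Char) (acc : List (List Char)),
    PySem.Chars.splitOn.go [sep] fuel l cur acc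
      = acc.reverse ++ (split1 sep l).modifyHead (cur.reverse ++ ·) := by
  intro l
  induction l with
  | nil =>
    intro fuel hf cur acc
    match fuel with
    | fuel + 1 => simp [PySem.Chars.splitOn.go, split1]
  | cons c t ih =>
    intro fuel hf cur acc
    match fuel with
    | fuel + 1 =>
      rw [PySem.Chars.splitOn.go]
      by_cases hc : c = sep
      · subst hc
        simp only [List.isPrefixOf, beq_self_eq_true, Bool.true_and, if_pos, List.length_cons, List.length_nil, List.drop_succ_cons, List.drop_zero]
        rw [ih fuel (by simpa using hf) [] (cur.reverse :: acc)]
        cases hs : split1 c t with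
        | nil => exact absurd hs (split1_ne_nil c t)
        | cons a l => simp [split1, hs]
      · have hpre : ([sep].isPrefixOf (c :: t)) = false := by
          simp [List.isPrefixOf]
          exact fun h => absurd h.symm hc
        simp only [hpre, Bool.false_eq_true, if_false]
        rw [ih fuel (by simpa using hf) (c :: cur) acc]
        simp only [split1, hc, if_false]
        cases h : split1 sep t with
        | nil => exact absurd h (split1_ne_nil sep t)
        | cons a l => simp

lemma splitOn_eq_split1 (sep : Char) (cs : List Char) :
    PySem.Chars.splitOn cs [sep] = split1 sep cs := by
  have h := go_spec sep cs (cs.length + 1) (by omega) [] []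
  rw [show PySem.Chars.splitOn cs [sep] = PySem.Chars.splitOn.go [sep] (cs.length + 1) cs [] []
    from rfl, h]
  cases hs : split1 sep cs with
  | nil => simp
  | cons a l => simp

lemma join_cons_of_ne_nil (d : List Char) {rest : List (List Char)} (h : rest ≠ []) :
    PySem.Chars.join ['/'] (d :: rest) = d ++ '/' :: PySem.Chars.join ['/'] rest := by
  cases rest with
  | nil => exact absurd rfl h
  | cons q qs => rw [PySem.Chars.join_cons_cons]; simp

-- A's loop, once cdir is nonempty, is exactly B's prefix joins seeded with cdir
lemma goA_spec (rest : List (List Char)) : ∀ (p : List Char) (acc : List (List Char)), p ≠ [] →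
    goA rest p acc
      = acc ++ (List.range rest.length).map
          (fun i => p ++ '/' :: PySem.Chars.join ['/'] (rest.take (i + 1))) := by
  induction rest with
  | nil => intro p acc hp; simp [goA]
  | cons d t ih =>
    intro p acc hp
    simp only [goA, if_pos hp, List.length_cons, List.range_succ_eq_map]
    rw [ih (p ++ ['/'] ++ d) (acc ++ [p ++ ['/'] ++ d]) (by simp)]
    simp only [List.map_cons, List.map_map, List.append_assoc, List.singleton_append,
      List.take_succ_cons, Function.comp_def]
    congr 1
    congr 1
    · simp [PySem.Chars.join_singleton]
    · apply List.map_congr_left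
      intro i hi
      have ht : t.take (i + 1) ≠ [] := by
        have : 0 < t.length := by
          simp only [List.mem_range] at hi; omega
        cases t with
        | nil => simp at this
        | cons a b => simp [List.take_succ_cons]
      rw [join_cons_of_ne_nil d ht]
      simp

-- A's loop on parts whose first component is nonempty equals B's prefix joins
lemma goA_eq_joins (p : List Char) (rest : List (List Char)) (hp : p ≠ []) :
    goA (p :: rest) [] []
      = (List.range (p :: rest).length).map
          (fun i => PySem.Chars.join ['/'] ((p :: rest).take (i + 1))) := by
  rw [show goA (p :: rest) [] [] = goA rest p [p] from by simp [goA]]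
  rw [goA_spec rest p [p] hp]
  simp only [List.length_cons, List.range_succ_eq_map, List.map_cons, List.map_map,
    List.take_succ_cons, Function.comp_def]
  rw [List.singleton_append]
  rw [show PySem.Chars.join ['/'] (p :: List.take 0 rest) = p from by
    simp [PySem.Chars.join_singleton]]
  congr 1
  apply List.map_congr_left
  intro i hi
  have ht : rest.take (i + 1) ≠ [] := by
    have : 0 < rest.length := by
      simp only [List.mem_range] at hi; omega
    cases rest with
    | nil => simp at this
    | cons a b => simp [List.take_succ_cons]
  rw [join_cons_of_ne_nil p ht]

-- pulling the accumulator out of goA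
lemma goA_acc (parts : List (List Char)) : ∀ (cdir : List Char) (acc : List (List Char)),
    goA parts cdir acc = acc ++ goA parts cdir [] := by
  induction parts with
  | nil => intro cdir acc; simp [goA]
  | cons d t ih =>
    intro cdir acc
    simp only [goA]
    rw [ih _ (acc ++ _), ih _ ([] ++ _)]
    simp

-- the first element surviving dropWhile fails the predicate
lemma dropWhile_head_not (p : Char → Bool) : ∀ (l : List Char) (x : Char) (xs : List Char),
    l.dropWhile p = x :: xs → p x = false := by
  intro l
  induction l with
  | nil => simp [List.dropWhile]
  | cons c t ih =>
    intro x xs h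
    by_cases hc : p c = true
    · rw [List.dropWhile_cons_of_pos hc] at h
      exact ih x xs h
    · rw [List.dropWhile_cons_of_neg hc] at h
      cases h
      simpa using hc

-- decomposition of file.toList produced by pyRsplit1 when '/' occurs
lemma pyRsplit1_of_mem (cs : List Char) (h : '/' ∈ cs) :
    ∃ parent tl, pyRsplit1 cs '/' = [parent, tl] ∧
      cs = parent ++ '/' :: tl ∧ '/' ∉ tl := by
  have hmem : '/' ∈ cs.reverse := by simpa using h
  have hdw : cs.reverse.dropWhile (fun c => !(c == '/')) ≠ [] := by
    intro hnil
    have := List.dropWhile_eq_nil_iff.mp hnil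
    have h2 := this '/' hmem
    simp at h2
  unfold pyRsplit1
  rw [List.span_eq_takeWhile_dropWhile]
  cases hd : cs.reverse.dropWhile (fun c => !(c == '/')) with
  | nil => exact absurd hd hdw
  | cons x initRev =>
    have hx : x = '/' := by
      have := dropWhile_head_not (fun c => !(c == '/')) cs.reverse x initRev hd
      simpa using this
    refine ⟨initRev.reverse, (cs.reverse.takeWhile (fun c => !(c == '/'))).reverse, rfl, ?_, ?_⟩
    · have hsplit : cs.reverse.takeWhile (fun c => !(c == '/')) ++ x :: initRev = cs.reverse := by
        rw [← hd]; exact List.takeWhile_append_dropWhile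
      have := congrArg List.reverse hsplit
      simpa [hx] using this.symm
    · intro hmem'
      have := List.mem_takeWhile_imp (by simpa using hmem')
      simp at this

lemma pyRsplit1_of_not_mem (cs : List Char) (h : '/' ∉ cs) :
    pyRsplit1 cs '/' = [cs] := by
  unfold pyRsplit1
  rw [List.span_eq_takeWhile_dropWhile]
  have hdw : cs.reverse.dropWhile (fun c => !(c == '/')) = [] := by
    rw [List.dropWhile_eq_nil_iff]
    intro x hx
    simp only [Bool.not_eq_eq_eq_not, Bool.not_true, beq_eq_false_iff_ne, ne_eq]
    intro hxe
    exact h (by simpa [hxe] using (List.mem_reverse.mp hx))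
  rw [hdw]

-- head of split1 starts with the head of its nonempty input when that head is not the separator
lemma split1_head_ne_nil (c : Char) (t : List Char) (hc : c ≠ '/') :
    ∃ h rest, split1 '/' (c :: t) = (c :: h) :: rest := by
  simp only [split1, if_neg hc]
  cases hsp : split1 '/' t with
  | nil => exact absurd hsp (split1_ne_nil '/' t)
  | cons a l => exact ⟨a, l, by simp⟩

lemma main_eq (file : String) (hD : ¬ D_get_node_folders file) :
    get_node_folders file = get_node_folders_alt file := by
  unfold get_node_folders get_node_folders_alt
  by_cases hmem : '/' ∈ file.toList
  · obtain ⟨parent, tl, hps, hcs, htl⟩ := pyRsplit1_of_mem file.toList hmem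
    rw [hps]
    simp only [List.length_cons, List.length_nil, List.headD_cons]
    norm_num
    rw [splitOn_eq_split1]
    cases hp : parent with
    | nil =>
      subst hp
      simp [split1, goA, PySem.Chars.join_singleton]
    | cons c pt =>
      have hc : c ≠ '/' := by
        intro hc
        apply hD
        constructor
        · rw [hcs, hp, hc]; simp
        · rw [hcs, hp]
          simp only [List.cons_append, List.drop_succ_cons, List.drop_zero]
          simp
      subst hp
      obtain ⟨h, rest, hsp⟩ := split1_head_ne_nil c pt hc
      rw [hsp, goA_eq_joins (c :: h) rest (by simp)]
      rw [List.map_map]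
      rfl
  · rw [pyRsplit1_of_not_mem file.toList hmem]
    simp

lemma main_ne (file : String) (hD : D_get_node_folders file) :
    get_node_folders file ≠ get_node_folders_alt file := by
  obtain ⟨hhead, htail⟩ := hD
  have hmem : '/' ∈ file.toList := by
    cases hcs : file.toList with
    | nil => rw [hcs] at hhead; simp at hhead
    | cons c t =>
      rw [hcs] at hhead
      simp only [List.head?_cons, Option.some.injEq] at hhead
      simp [hhead]
  obtain ⟨parent, tl, hps, hcs, htl⟩ := pyRsplit1_of_mem file.toList hmem
  -- parent is nonempty and starts with '/'
  have hpar : ∃ pt, parent = '/' :: pt := by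
    cases hp : parent with
    | nil =>
      exfalso
      rw [hp] at hcs
      rw [hcs] at htail
      simp only [List.nil_append, List.drop_succ_cons, List.drop_zero] at htail
      exact htl htail
    | cons c pt =>
      have : c = '/' := by
        rw [hcs, hp] at hhead
        simpa using hhead
      exact ⟨pt, by simp [this]⟩
  obtain ⟨pt, hpt⟩ := hpar
  -- element 1 of each output differs: A gives q, B gives '/' :: q
  unfold get_node_folders get_node_folders_alt
  rw [hps]
  simp only [List.length_cons, List.length_nil, List.headD_cons]
  norm_num
  rw [splitOn_eq_split1, hpt]
  have hsp : split1 '/' ('/' :: pt) = [] :: split1 '/' pt := by simp [split1]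
  rw [hsp]
  cases hq : split1 '/' pt with
  | nil => exact absurd hq (split1_ne_nil '/' pt)
  | cons q qs =>
    intro heq
    -- A's element 1 is q
    have hA : goA ([] :: q :: qs) [] [] = [] :: q :: goA qs q [] := by
      rw [show goA ([] :: q :: qs) [] [] = goA qs q [[], q] from by simp [goA],
        goA_acc qs q [[], q]]
      rfl
    rw [hA] at heq
    have hB2 : PySem.Chars.join ['/'] (([] :: q :: qs).take (1 + 1)) = '/' :: q := by
      simp only [List.take_succ_cons, List.take_zero]
      rw [PySem.Chars.join_cons_cons, PySem.Chars.join_singleton]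
      simp
    -- compare entries at index 1
    have h1 := congrArg (fun l => l[1]?) heq
    simp only [List.getElem?_map, List.getElem?_cons_succ, List.getElem?_cons_zero,
      List.length_cons] at h1
    rw [List.getElem?_range (by omega)] at h1
    simp only [Option.map_some, Option.some.injEq] at h1
    rw [hB2] at h1
    have hq' : q = '/' :: q := by
      have h2 := congrArg String.toList h1
      simpa [String.toList_ofList] using h2
    have hlq := congrArg List.length hq'
    simp at hlq

-- ===== VERDICT (by name: the statement is the Claim_ definition above) =====
theorem get_node_folders_spec : Claim_unchanged_get_node_folders := by
  intro file _ hD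
  exact main_eq file hD

theorem get_node_folders_changed : Claim_changed_get_node_folders := by
  unfold Claim_changed_get_node_folders; decide

theorem get_node_folders_tight : Claim_exact_get_node_folders := by
  intro file _ hD
  exact main_ne file hD
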